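-- pv_equiv track=rewrite | github.com/p-offtermatt/FastForward | artifact/benchmark/evaluate_result.py | count_solved_instances
-- ===== SOURCE A (Python) =====
-- def count_solved_instances(data):
--     error_sources = {}
--     times_solved = {}
--     samples_seen = {}
--
--     for row in data:
--         name = row["sampleName"]
--         samples_seen[name] = samples_seen.get(name, 0) + 1
--         if "error" in row and row["error"] != "":
--             if row["error"] == "timeout":
--                 errors_entry = error_sources.get(name, {})
--                 errors_entry["timeout"] = errors_entry.get("timeout", 0) + 1
--                 error_sources[name] = errors_entry
--             else:
--                 errors_entry = error_sources.get(name, {})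
--                 errors_entry["other_errors"] = errors_entry.get(
--                     "other_errors", 0) + 1
--                 error_sources[name] = errors_entry
--         else:
--             times_solved[name] = times_solved.get(name, 0) + 1
--
--     return samples_seen, times_solved, error_sources
-- ===== SOURCE B (Python) =====
-- def _tally(xs):
--     d = {}
--     for x in xs:
--         d[x] = d.get(x, 0) + 1
--     return d
--
--
-- def count_solved_instances(data):
--     names = [row["sampleName"] for row in data]
--     flags = [
--         ""
--         if row.get("error", "") == ""
--         else ("timeout" if row["error"] == "timeout" else "other_errors")
--         for row in data
--     ]
--
--     samples_seen = _tally(names)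
--     times_solved = _tally([n for n, f in zip(names, flags) if f == ""])
--     pair_counts = _tally([(n, f) for n, f in zip(names, flags) if f != ""])
--
--     error_sources = {}
--     for (n, f), c in pair_counts.items():
--         inner = error_sources.get(n, {})
--         inner[f] = c
--         error_sources[n] = inner
--     return samples_seen, times_solved, error_sources
-- ===== Notes on version B (the rewrite author's own statement) =====
-- stated objective: alternative
-- what changed: A builds all three result dicts in one stateful loop with branch-local updates; B instead extracts per-row (name, flag) columns, computes each result as an independent tally (samples_seen = tally of names, times_solved = tally of solved names, and a tally of (name, error-kind) pairs that a final regrouping pass turns into the nested error_sources dict).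
import Mathlib
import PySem

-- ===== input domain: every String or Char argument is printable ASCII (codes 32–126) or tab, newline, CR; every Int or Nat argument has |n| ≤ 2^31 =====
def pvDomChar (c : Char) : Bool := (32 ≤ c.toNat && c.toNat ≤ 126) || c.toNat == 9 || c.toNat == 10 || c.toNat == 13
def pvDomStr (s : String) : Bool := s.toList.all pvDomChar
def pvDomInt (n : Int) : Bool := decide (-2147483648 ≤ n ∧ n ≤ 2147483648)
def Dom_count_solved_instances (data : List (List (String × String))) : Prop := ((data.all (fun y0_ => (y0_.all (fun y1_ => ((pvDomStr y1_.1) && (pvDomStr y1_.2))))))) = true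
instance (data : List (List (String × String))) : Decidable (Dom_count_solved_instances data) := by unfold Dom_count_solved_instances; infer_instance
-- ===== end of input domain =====

-- B replaces A's single stateful three-dict loop by independent column tallies plus a
-- final regrouping pass (alternative decomposition, same O(n) cost).

-- ===== PORT A =====
def count_solved_instances (data : List (List (String × String))) :
    (List (String × Int)) × (List (String × Int)) × (List (String × List (String × Int))) :=
  let st := data.foldl
    (fun (st : PySem.Dict String Int × PySem.Dict String Int × PySem.Dict String (PySem.Dict String Int)) row =>
      let ss := st.1; let ts := st.2.1; let es := st.2.2
      -- name = row["sampleName"]  (Pre_ guarantees the key is present, so .getD "" is never taken)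
      let name := ((PySem.Dict.mk row).get? "sampleName").getD ""
      let ss := ss.insert name (ss.getD name 0 + 1)
      if (PySem.Dict.mk row).contains "error" && (((PySem.Dict.mk row).get? "error").getD "" != "") then
        if ((PySem.Dict.mk row).get? "error").getD "" == "timeout" then
          let errorsEntry := es.getD name PySem.Dict.empty
          let errorsEntry := errorsEntry.insert "timeout" (errorsEntry.getD "timeout" 0 + 1)
          (ss, ts, es.insert name errorsEntry)
        else
          let errorsEntry := es.getD name PySem.Dict.empty
          let errorsEntry := errorsEntry.insert "other_errors" (errorsEntry.getD "other_errors" 0 + 1)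
          (ss, ts, es.insert name errorsEntry)
      else
        (ss, ts.insert name (ts.getD name 0 + 1), es))
    (PySem.Dict.empty, PySem.Dict.empty, PySem.Dict.empty)
  (st.1.items, st.2.1.items, st.2.2.items.map (fun p => (p.1, p.2.items)))

-- ===== PORT B =====
def pvTally {α : Type} [BEq α] (xs : List α) : PySem.Dict α Int :=
  xs.foldl (fun d x => d.insert x (d.getD x 0 + 1)) PySem.Dict.empty

def count_solved_instances_alt (data : List (List (String × String))) :
    (List (String × Int)) × (List (String × Int)) × (List (String × List (String × Int))) :=
  let names := data.map (fun row => ((PySem.Dict.mk row).get? "sampleName").getD "")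
  let flags := data.map (fun row =>
      if (PySem.Dict.mk row).getD "error" "" == "" then ""
      else if ((PySem.Dict.mk row).get? "error").getD "" == "timeout" then "timeout"
      else "other_errors")
  let samples_seen := pvTally names
  let pairs := names.zip flags
  let times_solved := pvTally ((pairs.filter (fun p => p.2 == "")).map (fun p => p.1))
  let pair_counts := pvTally (pairs.filter (fun p => p.2 != ""))
  let error_sources := pair_counts.items.foldl
    (fun es q =>
      let inner := es.getD q.1.1 PySem.Dict.empty
      es.insert q.1.1 (inner.insert q.1.2 q.2))
    PySem.Dict.empty
  (samples_seen.items, times_solved.items, error_sources.items.map (fun p => (p.1, p.2.items)))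

-- ===== PRECONDITION & SPEC =====
-- Python A raises KeyError on any row lacking the "sampleName" key; exactly those inputs are excluded.
def Pre_count_solved_instances (data : List (List (String × String))) : Prop :=
  (data.all (fun row => (PySem.Dict.mk row).contains "sampleName")) = true
instance (data : List (List (String × String))) : Decidable (Pre_count_solved_instances data) := by
  unfold Pre_count_solved_instances; infer_instance

def pvWitness_count_solved_instances : (List (List (String × String))) :=
  [[("sampleName", "a")], [("sampleName", "a"), ("error", "timeout")], [("sampleName", "b"), ("error", "oom")]]

def Spec_count_solved_instances (data : List (List (String × String))) (out : (List (String × Int)) × (List (String × Int)) × (List (String × List (String × Int)))) : Prop := out = count_solved_instances_alt data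
instance (data : List (List (String × String))) (out : (List (String × Int)) × (List (String × Int)) × (List (String × List (String × Int)))) : Decidable (Spec_count_solved_instances data out) := by unfold Spec_count_solved_instances; infer_instance

-- ===== CLAIM (what is proved, stated in full; the proofs are below) =====
def Claim_equal_count_solved_instances : Prop := ∀ (data : List (List (String × String))), Dom_count_solved_instances data → Pre_count_solved_instances data → Spec_count_solved_instances data (count_solved_instances data)

-- ===== LEMMAS AND PROOFS =====

-- Per-row projections (proof-side names for the lambdas the ports use).
def pvNm (row : List (String × String)) : String :=
  ((PySem.Dict.mk row).get? "sampleName").getD ""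

def pvFlag (row : List (String × String)) : String :=
  if (PySem.Dict.mk row).getD "error" "" == "" then ""
  else if ((PySem.Dict.mk row).get? "error").getD "" == "timeout" then "timeout"
  else "other_errors"

-- A's error-dict step, over (name, flag) pairs.
def pvStepE (es : PySem.Dict String (PySem.Dict String Int)) (q : String × String) :
    PySem.Dict String (PySem.Dict String Int) :=
  es.insert q.1 ((es.getD q.1 PySem.Dict.empty).insert q.2
    ((es.getD q.1 PySem.Dict.empty).getD q.2 0 + 1))

-- B's regrouping step, over ((name, flag), count) items.
def pvRgStep (es : PySem.Dict String (PySem.Dict String Int)) (q : (String × String) × Int) :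
    PySem.Dict String (PySem.Dict String Int) :=
  es.insert q.1.1 ((es.getD q.1.1 PySem.Dict.empty).insert q.1.2 q.2)

def pvFS (d : PySem.Dict String Int) (row : List (String × String)) : PySem.Dict String Int :=
  d.insert (pvNm row) (d.getD (pvNm row) 0 + 1)

def pvFT (d : PySem.Dict String Int) (row : List (String × String)) : PySem.Dict String Int :=
  if pvFlag row == "" then d.insert (pvNm row) (d.getD (pvNm row) 0 + 1) else d

def pvFE (es : PySem.Dict String (PySem.Dict String Int)) (row : List (String × String)) :
    PySem.Dict String (PySem.Dict String Int) :=
  if pvFlag row != "" then pvStepE es (pvNm row, pvFlag row) else es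

-- A's fold splits into three independent component folds.
lemma pv_foldA (data : List (List (String × String)))
    (a : PySem.Dict String Int) (b : PySem.Dict String Int)
    (c : PySem.Dict String (PySem.Dict String Int)) :
    data.foldl
      (fun (st : PySem.Dict String Int × PySem.Dict String Int × PySem.Dict String (PySem.Dict String Int)) row =>
        let ss := st.1; let ts := st.2.1; let es := st.2.2
        let name := ((PySem.Dict.mk row).get? "sampleName").getD ""
        let ss := ss.insert name (ss.getD name 0 + 1)
        if (PySem.Dict.mk row).contains "error" && (((PySem.Dict.mk row).get? "error").getD "" != "") then
          if ((PySem.Dict.mk row).get? "error").getD "" == "timeout" then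
            let errorsEntry := es.getD name PySem.Dict.empty
            let errorsEntry := errorsEntry.insert "timeout" (errorsEntry.getD "timeout" 0 + 1)
            (ss, ts, es.insert name errorsEntry)
          else
            let errorsEntry := es.getD name PySem.Dict.empty
            let errorsEntry := errorsEntry.insert "other_errors" (errorsEntry.getD "other_errors" 0 + 1)
            (ss, ts, es.insert name errorsEntry)
        else
          (ss, ts.insert name (ts.getD name 0 + 1), es))
      (a, b, c)
    = (data.foldl pvFS a, data.foldl pvFT b, data.foldl pvFE c) := by
  induction data generalizing a b c with
  | nil => rfl
  | cons row data ih =>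
    simp only [List.foldl_cons]
    rcases hget : (PySem.Dict.mk row).get? "error" with _ | e
    · have hflag : pvFlag row = "" := by
        simp [pvFlag, PySem.Dict.getD_eq_get?_getD, hget]
      rw [if_neg (by simp [PySem.Dict.contains_eq_isSome_get?, hget]), ih]
      simp [pvFS, pvFT, pvFE, pvNm, hflag]
    · by_cases he : e = ""
      · subst he
        have hflag : pvFlag row = "" := by
          simp [pvFlag, PySem.Dict.getD_eq_get?_getD, hget]
        rw [if_neg (by simp [PySem.Dict.contains_eq_isSome_get?, hget]), ih]
        simp [pvFS, pvFT, pvFE, pvNm, hflag]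
      · by_cases ht : e = "timeout"
        · subst ht
          have hflag : pvFlag row = "timeout" := by
            simp [pvFlag, PySem.Dict.getD_eq_get?_getD, hget]
          rw [if_pos (by simp [PySem.Dict.contains_eq_isSome_get?, hget]),
            if_pos (by simp), ih]
          simp [pvFS, pvFT, pvFE, pvNm, pvStepE, hflag]
        · have hflag : pvFlag row = "other_errors" := by
            simp [pvFlag, PySem.Dict.getD_eq_get?_getD, hget, he, ht]
          rw [if_pos (by simp [PySem.Dict.contains_eq_isSome_get?, hget, he]),
            if_neg (by simpa using ht), ih]
          simp [pvFS, pvFT, pvFE, pvNm, pvStepE, hflag]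

-- counting values, A side
lemma pv_aval (P : List (String × String)) (es : PySem.Dict String (PySem.Dict String Int))
    (n f : String) :
    ((P.foldl pvStepE es).getD n PySem.Dict.empty).getD f 0
      = ((es.getD n PySem.Dict.empty).getD f 0) + (P.count (n, f) : Int) := by
  induction P generalizing es with
  | nil => simp
  | cons q P ih =>
    simp only [List.foldl_cons, ih, List.count_cons]
    have hstep : (((pvStepE es q).getD n PySem.Dict.empty).getD f 0)
        = ((es.getD n PySem.Dict.empty).getD f 0) + (if (n, f) = q then 1 else 0) := by
      simp only [pvStepE, PySem.Dict.getD_insert]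
      by_cases hn : n = q.1
      · subst hn
        by_cases hf : f = q.2
        · subst hf; simp
        · simp [PySem.Dict.getD_insert, hf, Prod.ext_iff]
      · have : ¬ ((n, f) = q) := fun h => hn (congrArg Prod.fst h)
        simp [hn, this]
    rw [hstep]
    by_cases hq : q = (n, f)
    · simp only [if_pos hq.symm, beq_iff_eq, if_pos hq]
      push_cast
      ring
    · have hq' : ¬ ((n, f) = q) := fun h => hq h.symm
      simp [hq, hq', beq_iff_eq]

-- counting values, B side: the regroup fold is a last-write fold at each (n, f)
lemma pv_bval (Q : List ((String × String) × Int)) (es : PySem.Dict String (PySem.Dict String Int))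
    (n f : String) :
    ((Q.foldl pvRgStep es).getD n PySem.Dict.empty).getD f 0
      = Q.foldl (fun a q => if q.1 = (n, f) then q.2 else a)
          ((es.getD n PySem.Dict.empty).getD f 0) := by
  induction Q generalizing es with
  | nil => rfl
  | cons q Q ih =>
    simp only [List.foldl_cons, ih]
    congr 1
    simp only [pvRgStep, PySem.Dict.getD_insert]
    by_cases hn : n = q.1.1
    · rw [if_pos hn, PySem.Dict.getD_insert]
      by_cases hf : f = q.1.2
      · have hq : q.1 = (n, f) := by rw [hn, hf]
        rw [if_pos hf, if_pos hq]
      · have hq : ¬ (q.1 = (n, f)) := fun h => hf (congrArg Prod.snd h).symm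
        rw [if_neg hf, if_neg hq, hn]
    · have hq : ¬ (q.1 = (n, f)) := fun h => hn (congrArg Prod.fst h).symm
      rw [if_neg hn, if_neg hq]

lemma pv_lastUpd_of_not_mem (n f : String) :
    ∀ (Q : List ((String × String) × Int)) (a : Int), (n, f) ∉ Q.map (fun q => q.1) →
      Q.foldl (fun a q => if q.1 = (n, f) then q.2 else a) a = a := by
  intro Q
  induction Q with
  | nil => intro a _; rfl
  | cons q Q ih =>
    intro a h
    simp only [List.map_cons, List.mem_cons] at h
    push Not at h
    simp only [List.foldl_cons, if_neg (fun he => h.1 (Eq.symm he))]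
    exact ih a h.2

lemma pv_lastUpd_assoc (n f : String) (g : String × String → Int) :
    ∀ (M : List (String × String)) (a : Int), M.Nodup →
      ((M.map (fun k => (k, g k))).foldl (fun a q => if q.1 = (n, f) then q.2 else a) a)
        = if (n, f) ∈ M then g (n, f) else a := by
  intro M
  induction M with
  | nil => intro a _; simp
  | cons k M ih =>
    intro a hnd
    rcases List.nodup_cons.mp hnd with ⟨hk, hnd'⟩
    by_cases he : k = (n, f)
    · subst he
      simp only [List.map_cons, List.foldl_cons]
      rw [pv_lastUpd_of_not_mem n f _ _ (by simpa using hk)]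
      simp
    · simp only [List.map_cons, List.foldl_cons, if_neg he, ih _ hnd',
        List.mem_cons]
      have : ¬ ((n, f) = k) := fun h => he h.symm
      simp [this]

-- keys of an insert are Set.add of the keys
lemma pv_keys_insert_add {ν : Type} (d : PySem.Dict String ν) (k : String) (v : ν) :
    (d.insert k v).keys = PySem.Set.add d.keys k := by
  by_cases h : d.contains k
  · rw [PySem.Dict.keys_insert_of_contains d v h, PySem.Set.add_eq_ite,
      if_pos (((PySem.Dict.contains_iff_mem_keys d k).mp h))]
  · rw [PySem.Dict.keys_insert_of_not_contains d v (by simpa using h), PySem.Set.add_eq_ite,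
      if_neg (fun hm => h ((PySem.Dict.contains_iff_mem_keys d k).mpr hm))]

-- dedup commutes with filter-then-map applied after an inner dedup
lemma pv_ofList_map_filter_ofList {β : Type} [BEq β] [LawfulBEq β]
    (P : List (String × String)) (p : String × String → Bool) (g : String × String → β) :
    PySem.Set.ofList (((PySem.Set.ofList P).filter p).map g)
      = PySem.Set.ofList ((P.filter p).map g) := by
  induction P using List.reverseRecOn with
  | nil => rfl
  | append_singleton P x ih =>
    rw [PySem.Set.ofList_append_singleton, PySem.Set.add_eq_ite]
    by_cases hx : x ∈ PySem.Set.ofList P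
    · have hxP : x ∈ P := (PySem.Set.mem_ofList P x).mp hx
      rw [if_pos hx, ih]
      by_cases hp : p x = true
      · have hgx : g x ∈ (P.filter p).map g :=
          List.mem_map_of_mem (List.mem_filter.mpr ⟨hxP, hp⟩)
        rw [List.filter_append, List.map_append]
        simp only [List.filter_cons, hp, if_pos, List.filter_nil, List.map_cons, List.map_nil]
        rw [PySem.Set.ofList_append_singleton, PySem.Set.add_of_mem
          ((PySem.Set.mem_ofList _ _).mpr hgx)]
      · simp only [List.filter_append, List.filter_cons, hp]
        simp
    · rw [if_neg hx]
      by_cases hp : p x = true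
      · rw [List.filter_append, List.filter_append, List.map_append, List.map_append]
        simp only [List.filter_cons, hp, if_pos, List.filter_nil, List.map_cons, List.map_nil]
        rw [PySem.Set.ofList_append_singleton, PySem.Set.ofList_append_singleton, ih]
      · simp only [List.filter_append, List.filter_cons, hp]
        simpa using ih

-- inner key lists, A side
lemma pv_ainner (P : List (String × String)) (es : PySem.Dict String (PySem.Dict String Int))
    (n : String) :
    ((P.foldl pvStepE es).getD n PySem.Dict.empty).keys
      = PySem.Set.update ((es.getD n PySem.Dict.empty).keys)
          ((P.filter (fun q => q.1 == n)).map (fun q => q.2)) := by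
  induction P generalizing es with
  | nil => simp [PySem.Set.update_nil]
  | cons q P ih =>
    simp only [List.foldl_cons, List.filter_cons]
    by_cases hn : q.1 = n
    · simp only [hn, beq_self_eq_true, if_true, List.map_cons]
      rw [ih, PySem.Set.update_cons]
      congr 1
      simp only [pvStepE, PySem.Dict.getD_insert, if_pos hn.symm]
      rw [pv_keys_insert_add]
      congr 1
      rw [hn]
    · have hb : (q.1 == n) = false := by simpa using hn
      simp only [hb, Bool.false_eq_true, if_false]
      rw [ih]
      congr 2
      simp only [pvStepE, PySem.Dict.getD_insert, if_neg (fun h => hn (Eq.symm h))]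

-- inner key lists, B side
lemma pv_binner (Q : List ((String × String) × Int)) (es : PySem.Dict String (PySem.Dict String Int))
    (n : String) :
    ((Q.foldl pvRgStep es).getD n PySem.Dict.empty).keys
      = PySem.Set.update ((es.getD n PySem.Dict.empty).keys)
          ((Q.filter (fun q => q.1.1 == n)).map (fun q => q.1.2)) := by
  induction Q generalizing es with
  | nil => simp [PySem.Set.update_nil]
  | cons q Q ih =>
    simp only [List.foldl_cons, List.filter_cons]
    by_cases hn : q.1.1 = n
    · simp only [hn, beq_self_eq_true, if_true, List.map_cons]
      rw [ih, PySem.Set.update_cons]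
      congr 1
      simp only [pvRgStep, PySem.Dict.getD_insert, if_pos hn.symm]
      rw [pv_keys_insert_add]
      congr 1
      rw [hn]
    · have hb : (q.1.1 == n) = false := by simpa using hn
      simp only [hb, Bool.false_eq_true, if_false]
      rw [ih]
      congr 2
      simp only [pvRgStep, PySem.Dict.getD_insert, if_neg (fun h => hn (Eq.symm h))]

-- the core: A's error fold over (name, flag) pairs = B's regroup of the pair tally
lemma pv_core (P : List (String × String)) :
    P.foldl pvStepE PySem.Dict.empty
      = (pvTally P).items.foldl pvRgStep PySem.Dict.empty := by
  have hT : pvTally P = PySem.Dict.counter P :=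
    PySem.Dict.foldl_insert_getD_add_one_eq_counter P
  rw [hT, PySem.Dict.items_counter]
  have hndM : (PySem.Set.ofList P).Nodup := PySem.Set.nodup_ofList P
  have hkA : (P.foldl pvStepE PySem.Dict.empty).keys
      = PySem.Set.ofList (P.map (fun q => q.1)) := by
    have := PySem.Dict.keys_foldl_insert_key (ν := PySem.Dict String Int) P (fun q => q.1)
      (fun d q => (d.getD q.1 PySem.Dict.empty).insert q.2
        ((d.getD q.1 PySem.Dict.empty).getD q.2 0 + 1)) PySem.Dict.empty
    simpa [PySem.Set.update_nil_left] using this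
  have hkB : ∀ (Q : List ((String × String) × Int)),
      (Q.foldl pvRgStep PySem.Dict.empty).keys
        = PySem.Set.ofList (Q.map (fun q => q.1.1)) := by
    intro Q
    have := PySem.Dict.keys_foldl_insert_key (ν := PySem.Dict String Int) Q (fun q => q.1.1)
      (fun d q => (d.getD q.1.1 PySem.Dict.empty).insert q.1.2 q.2) PySem.Dict.empty
    simpa [PySem.Set.update_nil_left] using this
  have hkB' : (((PySem.Set.ofList P).map (fun k => (k, (List.count k P : Int)))).foldl
        pvRgStep PySem.Dict.empty).keys = PySem.Set.ofList (P.map (fun q => q.1)) := by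
    rw [hkB, List.map_map]
    have := pv_ofList_map_filter_ofList P (fun _ => true) (fun q => q.1)
    simpa using this
  have hndA : (P.foldl pvStepE PySem.Dict.empty).keys.Nodup := by
    rw [hkA]; exact PySem.Set.nodup_ofList _
  have hndB : (((PySem.Set.ofList P).map (fun k => (k, (List.count k P : Int)))).foldl
      pvRgStep PySem.Dict.empty).keys.Nodup := by
    rw [hkB']; exact PySem.Set.nodup_ofList _
  apply PySem.Dict.ext
  rw [PySem.Dict.items_eq_map_keys _ hndA PySem.Dict.empty,
    PySem.Dict.items_eq_map_keys _ hndB PySem.Dict.empty, hkA, hkB']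
  apply List.map_congr_left
  intro n _
  have hinner : (P.foldl pvStepE PySem.Dict.empty).getD n PySem.Dict.empty
      = (((PySem.Set.ofList P).map (fun k => (k, (List.count k P : Int)))).foldl
          pvRgStep PySem.Dict.empty).getD n PySem.Dict.empty := by
    have hIA : ((P.foldl pvStepE PySem.Dict.empty).getD n PySem.Dict.empty).keys
        = PySem.Set.ofList ((P.filter (fun q => q.1 == n)).map (fun q => q.2)) := by
      rw [pv_ainner]
      simp [PySem.Set.update_nil_left]
    have hIB : ((((PySem.Set.ofList P).map (fun k => (k, (List.count k P : Int)))).foldl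
          pvRgStep PySem.Dict.empty).getD n PySem.Dict.empty).keys
        = PySem.Set.ofList ((P.filter (fun q => q.1 == n)).map (fun q => q.2)) := by
      rw [pv_binner]
      rw [List.filter_map, List.map_map]
      rw [show ((fun q => q.1.1 == n) ∘ (fun k => (k, (List.count k P : Int))))
          = (fun q => q.1 == n) from rfl]
      rw [show ((fun (q : (String × String) × Int) => q.1.2)
            ∘ (fun k => (k, (List.count k P : Int)))) = (fun q => q.2) from rfl]
      simp only [PySem.Dict.getD_empty, PySem.Dict.keys_empty, PySem.Set.update_nil_left]
      exact pv_ofList_map_filter_ofList P (fun q => q.1 == n) (fun q => q.2)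
    have hndIA : ((P.foldl pvStepE PySem.Dict.empty).getD n PySem.Dict.empty).keys.Nodup := by
      rw [hIA]; exact PySem.Set.nodup_ofList _
    have hndIB : ((((PySem.Set.ofList P).map (fun k => (k, (List.count k P : Int)))).foldl
        pvRgStep PySem.Dict.empty).getD n PySem.Dict.empty).keys.Nodup := by
      rw [hIB]; exact PySem.Set.nodup_ofList _
    apply PySem.Dict.ext
    rw [PySem.Dict.items_eq_map_keys _ hndIA 0, PySem.Dict.items_eq_map_keys _ hndIB 0,
      hIA, hIB]
    apply List.map_congr_left
    intro f _
    have hva : ((P.foldl pvStepE PySem.Dict.empty).getD n PySem.Dict.empty).getD f 0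
        = (P.count (n, f) : Int) := by
      rw [pv_aval]
      simp
    have hvb : ((((PySem.Set.ofList P).map (fun k => (k, (List.count k P : Int)))).foldl
          pvRgStep PySem.Dict.empty).getD n PySem.Dict.empty).getD f 0
        = (P.count (n, f) : Int) := by
      rw [pv_bval, PySem.Dict.getD_empty, PySem.Dict.getD_empty,
        pv_lastUpd_assoc n f _ _ 0 hndM]
      by_cases hm : (n, f) ∈ PySem.Set.ofList P
      · rw [if_pos hm]
      · rw [if_neg hm]
        have : (n, f) ∉ P := fun h => hm ((PySem.Set.mem_ofList P (n, f)).mpr h)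
        simp [List.count_eq_zero.mpr this]
    rw [hva, hvb]
  rw [hinner]



-- ===== VERDICT (by name: the statement is the Claim_ definition above) =====
theorem count_solved_instances_spec : Claim_equal_count_solved_instances := by
  intro data _ _
  unfold Spec_count_solved_instances
  show count_solved_instances data = count_solved_instances_alt data
  have hA : count_solved_instances data
      = ((data.foldl pvFS PySem.Dict.empty).items,
         (data.foldl pvFT PySem.Dict.empty).items,
         (data.foldl pvFE PySem.Dict.empty).items.map (fun p => (p.1, p.2.items))) := by
    unfold count_solved_instances
    rw [pv_foldA]
  have hB : count_solved_instances_alt data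
      = ((pvTally (data.map pvNm)).items,
         (pvTally ((((data.map pvNm).zip (data.map pvFlag)).filter
             (fun p => p.2 == "")).map (fun p => p.1))).items,
         ((pvTally (((data.map pvNm).zip (data.map pvFlag)).filter
             (fun p => p.2 != ""))).items.foldl pvRgStep PySem.Dict.empty).items.map
           (fun p => (p.1, p.2.items))) := rfl
  rw [hA, hB]
  have e1 : data.foldl pvFS PySem.Dict.empty = pvTally (data.map pvNm) := by
    rw [pvTally, List.foldl_map]
    rfl
  have e2 : data.foldl pvFT PySem.Dict.empty
      = pvTally ((((data.map pvNm).zip (data.map pvFlag)).filter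
          (fun p => p.2 == "")).map (fun p => p.1)) := by
    rw [List.zip_map', List.filter_map, List.map_map, pvTally, List.foldl_map]
    simp only [Function.comp]
    unfold pvFT
    exact PySem.List.foldl_if_eq_foldl_filter _ _ data _
  have e3 : data.foldl pvFE PySem.Dict.empty
      = ((pvTally (((data.map pvNm).zip (data.map pvFlag)).filter
          (fun p => p.2 != ""))).items.foldl pvRgStep PySem.Dict.empty) := by
    rw [List.zip_map', List.filter_map, ← pv_core, List.foldl_map]
    unfold pvFE
    exact PySem.List.foldl_if_eq_foldl_filter _ _ data _
  rw [e1, e2, e3]
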